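-- pv_equiv track=rewrite | github.com/sharmaji27/InterviewBit-Problems | Trees/Hotel Reviews.py | solve
-- ===== SOURCE A (Python) =====
-- from heapq import heappop,heappush,heapify
--
-- def solve(A, B):
--     gw = {}
--     for i in A.split('_'):
--         gw[i]=1
--
--     heap = []
--
--     for i in range(len(B)):
--         count=0
--         for word in B[i].split('_'):
--             if word in gw:
--                 count+=1
--         heappush(heap,(-count,i))
--
--     res = []
--     while heap:
--         res.append(heappop(heap)[1])
--     return res
-- ===== SOURCE B (Python) =====
-- def solve(A, B):
--     # B: no heap -- build the good-word set, count per review, and emit the order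
--     # with one stable sort keyed by (-count, index).
--     good = set(A.split('_'))
--     counts = [sum(w in good for w in b.split('_')) for b in B]
--     return sorted(range(len(B)), key=lambda i: (-counts[i], i))
-- ===== Notes on version B (the rewrite author's own statement) =====
-- stated objective: faster
-- what changed: Replaces the hand-driven binary heap (heappush every (-count, i) pair, then pop one by one) with a set-based count comprehension and a single stable sort of the indices keyed by (-count, index).
import Mathlib
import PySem

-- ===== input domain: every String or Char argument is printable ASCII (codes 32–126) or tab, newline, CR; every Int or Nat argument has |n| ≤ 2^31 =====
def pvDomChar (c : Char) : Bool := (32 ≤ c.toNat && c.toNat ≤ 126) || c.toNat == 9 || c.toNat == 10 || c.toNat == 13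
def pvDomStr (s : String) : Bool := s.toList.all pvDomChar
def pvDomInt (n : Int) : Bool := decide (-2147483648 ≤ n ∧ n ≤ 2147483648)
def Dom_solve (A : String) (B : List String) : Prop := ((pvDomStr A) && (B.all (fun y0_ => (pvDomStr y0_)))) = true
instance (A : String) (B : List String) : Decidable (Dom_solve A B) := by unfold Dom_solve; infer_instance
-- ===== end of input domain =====

-- B replaces A's hand-driven binary heap (heappush all pairs, pop one by one) by a single
-- stable sort of the indices keyed by (-count, index); same exact output, no heap maintained.


-- ===== PORT A =====

-- Python tuple '<' on (int, int): lexicographic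
def pyLtPair (a b : Int × Int) : Bool := decide (a.1 < b.1) || (a.1 == b.1 && decide (a.2 < b.2))

-- heapq._siftdown(heap, startpos, pos) with newitem = the value being sifted up.
-- The while-loop is run on a structural fuel counter; pos strictly decreases each
-- iteration, so with fuel = pos the recursion is exactly Python's loop on every input.
def siftdownGo : Nat → List (Int × Int) → Nat → Nat → (Int × Int) → List (Int × Int)
  | 0, heap, _startpos, pos, newitem => heap.set pos newitem
  | fuel + 1, heap, startpos, pos, newitem =>
    if startpos < pos then
      let parentpos := (pos - 1) / 2
      let parent := heap.getD parentpos (0, 0)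
      if pyLtPair newitem parent then
        siftdownGo fuel (heap.set pos parent) startpos parentpos newitem
      else heap.set pos newitem
    else heap.set pos newitem

def heapSiftdown (heap : List (Int × Int)) (startpos pos : Nat) (newitem : Int × Int) :
    List (Int × Int) :=
  siftdownGo pos heap startpos pos newitem

-- heapq._siftup(heap, pos) with newitem = heap[pos] at call time; the loop index pos
-- strictly increases below heap.length, so fuel = heap.length runs the exact loop.
def siftupGo : Nat → List (Int × Int) → Nat → Nat → (Int × Int) → List (Int × Int)
  | 0, heap, startpos, pos, newitem =>
    heapSiftdown (heap.set pos newitem) startpos pos newitem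
  | fuel + 1, heap, startpos, pos, newitem =>
    if 2 * pos + 1 < heap.length then
      let childpos := 2 * pos + 1
      let childpos' :=
        if childpos + 1 < heap.length &&
            !(pyLtPair (heap.getD childpos (0, 0)) (heap.getD (childpos + 1) (0, 0))) then
          childpos + 1
        else childpos
      siftupGo fuel (heap.set pos (heap.getD childpos' (0, 0))) startpos childpos' newitem
    else heapSiftdown (heap.set pos newitem) startpos pos newitem

def heapSiftup (heap : List (Int × Int)) (startpos pos : Nat) (newitem : Int × Int) :
    List (Int × Int) :=
  siftupGo heap.length heap startpos pos newitem

def heapPush (heap : List (Int × Int)) (item : Int × Int) : List (Int × Int) :=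
  heapSiftdown (heap ++ [item]) 0 heap.length item

-- heapq.heappop; only called on a non-empty heap
def heapPop (heap : List (Int × Int)) : (Int × Int) × List (Int × Int) :=
  let lastelt := heap.getLastD (0, 0)
  let rest := heap.dropLast
  if rest.isEmpty then (lastelt, rest)
  else (rest.getD 0 (0, 0), heapSiftup (rest.set 0 lastelt) 0 0 lastelt)

-- the 'while heap: res.append(heappop(heap)[1])' loop; each pop removes one element,
-- so fuel = heap.length runs the exact loop.
def popLoopGo : Nat → List (Int × Int) → List Int → List Int
  | 0, _heap, res => res
  | fuel + 1, heap, res =>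
    if heap.isEmpty then res
    else
      let p := heapPop heap
      popLoopGo fuel p.2 (res ++ [p.1.2])

def popLoop (heap : List (Int × Int)) (res : List Int) : List Int :=
  popLoopGo heap.length heap res

def solve (A : String) (B : List String) : List Int :=
  let gw : PySem.Dict String Int :=
    ((PySem.Str.split? A "_").getD []).foldl (fun d i => d.insert i 1) PySem.Dict.empty
  let heap : List (Int × Int) :=
    (PySem.List.pyRange 0 (PySem.List.len B) 1).foldl
      (fun hp i =>
        let count : Int :=
          ((PySem.Str.split? (PySem.List.pyGetD B i "") "_").getD []).foldl
            (fun c word => if (gw.get? word).isSome then c + 1 else c) 0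
        heapPush hp (-count, i)) []
  popLoop heap []

-- ===== PORT B =====
def solve_alt (A : String) (B : List String) : List Int :=
  let good : PySem.Set String := PySem.Set.ofList ((PySem.Str.split? A "_").getD [])
  let counts : List Int :=
    B.map (fun b =>
      (((PySem.Str.split? b "_").getD []).map
        (fun w => if PySem.Set.contains good w then (1 : Int) else 0)).sum)
  PySem.List.sorted2 (PySem.List.pyRange 0 (PySem.List.len B) 1)
    (fun i => -(PySem.List.pyGetD counts i 0)) (fun i => i) false

-- ===== PRECONDITION & SPEC =====
def Spec_solve (A : String) (B : List String) (out : List Int) : Prop := out = solve_alt A B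
instance (A : String) (B : List String) (out : List Int) : Decidable (Spec_solve A B out) := by unfold Spec_solve; infer_instance

-- ===== CLAIM (what is proved, stated in full; the proofs are below) =====
def Claim_equal_solve : Prop := ∀ (A : String) (B : List String), Dom_solve A B → Spec_solve A B (solve A B)

-- ===== LEMMAS AND PROOFS =====

theorem pyLtPair_iff (u v : Int × Int) : pyLtPair u v = true ↔ toLex u < toLex v := by
  simp [pyLtPair, Prod.Lex.toLex_lt_toLex]

theorem pyLtPair_eq_false_iff (u v : Int × Int) :
    pyLtPair u v = false ↔ toLex v ≤ toLex u := by
  rw [← not_lt, ← pyLtPair_iff]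
  simp

theorem getD_set_self {α : Type} (l : List α) (i : Nat) (v d : α) (h : i < l.length) :
    (l.set i v).getD i d = v := by
  simp [List.getD_eq_getElem?_getD, h]

theorem getD_set_ne {α : Type} (l : List α) (i j : Nat) (hne : i ≠ j) (v d : α) :
    (l.set i v).getD j d = l.getD j d := by
  simp [List.getD_eq_getElem?_getD, hne]

theorem getD_eq_getElem {α : Type} (l : List α) (i : Nat) (d : α) (h : i < l.length) :
    l.getD i d = l[i] := by
  simp [List.getD_eq_getElem?_getD, List.getElem?_eq_getElem h]

theorem count_indicator (z : Int × Int) (a : List (Int × Int)) (i : Nat) (h : i < a.length)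
    (hz : a[i] = z) : 0 < List.count z a :=
  List.count_pos_iff.mpr (hz ▸ a.getElem_mem h)

theorem perm_set_set (a : List (Int × Int)) (p q : Nat) (x : Int × Int)
    (hp : p < a.length) (hq : q < a.length) (hne : p ≠ q) :
    ((a.set p (a.getD q (0, 0))).set q x).Perm (a.set p x) := by
  rw [getD_eq_getElem _ _ _ hq, List.perm_iff_count]
  intro z
  have hq' : q < (a.set p (a[q]'hq)).length := by simpa using hq
  rw [List.count_set hq', List.count_set hp, List.count_set hp, List.getElem_set_ne hne]
  have hcq : (a[q] == z) = true → 0 < List.count z a := fun h' =>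
    count_indicator z a q hq (by simpa using h')
  have hcp : (a[p] == z) = true → 0 < List.count z a := fun h' =>
    count_indicator z a p hp (by simpa using h')
  split_ifs with h1 h2 h3 <;> simp_all

-- the Python min-heap invariant: every non-root element is ≥ its parent
def HeapInv (a : List (Int × Int)) : Prop :=
  ∀ j : Nat, j < a.length → 0 < j →
    toLex (a.getD ((j - 1) / 2) (0, 0)) ≤ toLex (a.getD j (0, 0))

theorem root_min (a : List (Int × Int)) (hinv : HeapInv a) :
    ∀ j : Nat, j < a.length → toLex (a.getD 0 (0, 0)) ≤ toLex (a.getD j (0, 0)) := by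
  intro j
  induction j using Nat.strong_induction_on with
  | _ j ih =>
    intro hj
    rcases Nat.eq_zero_or_pos j with h0 | h0
    · subst h0; exact le_refl _
    · exact le_trans (ih ((j - 1) / 2) (by omega) (by omega)) (hinv j hj h0)

theorem setPos_inv (a : List (Int × Int)) (pos : Nat) (x : Int × Int) (hpos : pos < a.length)
    (D1 : ∀ j, j < a.length → 0 < j → j ≠ pos → (j - 1) / 2 ≠ pos →
      toLex (a.getD ((j - 1) / 2) (0, 0)) ≤ toLex (a.getD j (0, 0)))
    (U1b : ∀ j, j < a.length → 0 < j → (j - 1) / 2 = pos →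
      toLex x ≤ toLex (a.getD j (0, 0)))
    (Hpar : 0 < pos → toLex (a.getD ((pos - 1) / 2) (0, 0)) ≤ toLex x) :
    HeapInv (a.set pos x) := by
  intro j hj h0j
  rw [List.length_set] at hj
  by_cases hjp : j = pos
  · subst hjp
    rw [getD_set_self _ _ _ _ hj, getD_set_ne _ _ _ (by omega) _ _]
    exact Hpar h0j
  · rw [getD_set_ne _ _ _ (Ne.symm hjp) _ _]
    by_cases hpar : (j - 1) / 2 = pos
    · rw [hpar, getD_set_self _ _ _ _ hpos]
      exact U1b j hj h0j hpar
    · rw [getD_set_ne _ _ _ (fun h => hpar h.symm) _ _]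
      exact D1 j hj h0j hjp hpar

theorem siftdownGo_spec (x : Int × Int) :
    ∀ (fuel pos : Nat) (a : List (Int × Int)), pos ≤ fuel → pos < a.length →
    (∀ j, j < a.length → 0 < j → j ≠ pos → (j - 1) / 2 ≠ pos →
      toLex (a.getD ((j - 1) / 2) (0, 0)) ≤ toLex (a.getD j (0, 0))) →
    (∀ j, j < a.length → 0 < j → (j - 1) / 2 = pos →
      toLex x ≤ toLex (a.getD j (0, 0))) →
    (0 < pos → ∀ j, j < a.length → 0 < j → (j - 1) / 2 = pos →
      toLex (a.getD ((pos - 1) / 2) (0, 0)) ≤ toLex (a.getD j (0, 0))) →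
    (siftdownGo fuel a 0 pos x).Perm (a.set pos x) ∧
      HeapInv (siftdownGo fuel a 0 pos x) := by
  intro fuel
  induction fuel with
  | zero =>
    intro pos a hf hpos D1 U1b U2
    have h0 : pos = 0 := by omega
    subst h0
    exact ⟨List.Perm.refl _, setPos_inv a 0 x hpos D1 U1b (fun h => absurd h (by omega))⟩
  | succ fuel ih =>
    intro pos a hf hpos D1 U1b U2
    simp only [siftdownGo]
    by_cases h0 : 0 < pos
    · rw [if_pos h0]
      set p := (pos - 1) / 2 with hp_def
      have hp_lt : p < pos := by omega
      have hp_len : p < a.length := by omega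
      by_cases hlt : pyLtPair x (a.getD p (0, 0)) = true
      · rw [if_pos hlt]
        have hxlt : toLex x < toLex (a.getD p (0, 0)) := (pyLtPair_iff _ _).mp hlt
        set w := a.getD p (0, 0) with hw_def
        have hlen' : (a.set pos w).length = a.length := by simp
        have D1' : ∀ j, j < (a.set pos w).length → 0 < j → j ≠ p → (j - 1) / 2 ≠ p →
            toLex ((a.set pos w).getD ((j - 1) / 2) (0, 0)) ≤
              toLex ((a.set pos w).getD j (0, 0)) := by
          intro j hj h0j hjp hparp
          rw [hlen'] at hj
          have hjpos : j ≠ pos := by omega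
          rw [getD_set_ne _ _ _ (Ne.symm hjpos) _ _]
          by_cases hpar : (j - 1) / 2 = pos
          · rw [hpar, getD_set_self _ _ _ _ hpos]
            exact U2 h0 j hj h0j hpar
          · rw [getD_set_ne _ _ _ (fun h => hpar h.symm) _ _]
            exact D1 j hj h0j hjpos hpar
        have U1b' : ∀ j, j < (a.set pos w).length → 0 < j → (j - 1) / 2 = p →
            toLex x ≤ toLex ((a.set pos w).getD j (0, 0)) := by
          intro j hj h0j hpar
          rw [hlen'] at hj
          by_cases hjpos : j = pos
          · subst hjpos
            rw [getD_set_self _ _ _ _ hpos]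
            exact le_of_lt hxlt
          · rw [getD_set_ne _ _ _ (Ne.symm hjpos) _ _]
            have hD := D1 j hj h0j hjpos (by omega)
            rw [hpar] at hD
            exact le_trans (le_of_lt hxlt) hD
        have U2' : 0 < p → ∀ j, j < (a.set pos w).length → 0 < j → (j - 1) / 2 = p →
            toLex ((a.set pos w).getD ((p - 1) / 2) (0, 0)) ≤
              toLex ((a.set pos w).getD j (0, 0)) := by
          intro h0p j hj h0j hpar
          rw [hlen'] at hj
          have hq : (p - 1) / 2 ≠ pos := by omega
          rw [getD_set_ne _ _ _ (fun h => hq h.symm) _ _]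
          have hqp : toLex (a.getD ((p - 1) / 2) (0, 0)) ≤ toLex w := by
            rw [hw_def]
            exact D1 p hp_len h0p (by omega) (by omega)
          by_cases hjpos : j = pos
          · subst hjpos
            rw [getD_set_self _ _ _ _ hpos]
            exact hqp
          · rw [getD_set_ne _ _ _ (Ne.symm hjpos) _ _]
            have hD := D1 j hj h0j hjpos (by omega)
            rw [hpar] at hD
            exact le_trans hqp hD
        obtain ⟨hperm, hinv⟩ :=
          ih p (a.set pos w) (by omega) (by simpa using hp_len) D1' U1b' U2'
        refine ⟨hperm.trans ?_, hinv⟩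
        exact perm_set_set a pos p x hpos hp_len (by omega)
      · rw [if_neg hlt]
        refine ⟨List.Perm.refl _, setPos_inv a pos x hpos D1 U1b fun _ => ?_⟩
        exact (pyLtPair_eq_false_iff _ _).mp (by simpa using hlt)
    · rw [if_neg h0]
      exact ⟨List.Perm.refl _, setPos_inv a pos x hpos D1 U1b (fun h => absurd h h0)⟩

theorem siftdown_spec (x : Int × Int) (pos : Nat) (a : List (Int × Int))
    (hpos : pos < a.length)
    (D1 : ∀ j, j < a.length → 0 < j → j ≠ pos → (j - 1) / 2 ≠ pos →
      toLex (a.getD ((j - 1) / 2) (0, 0)) ≤ toLex (a.getD j (0, 0)))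
    (U1b : ∀ j, j < a.length → 0 < j → (j - 1) / 2 = pos →
      toLex x ≤ toLex (a.getD j (0, 0)))
    (U2 : 0 < pos → ∀ j, j < a.length → 0 < j → (j - 1) / 2 = pos →
      toLex (a.getD ((pos - 1) / 2) (0, 0)) ≤ toLex (a.getD j (0, 0))) :
    (heapSiftdown a 0 pos x).Perm (a.set pos x) ∧ HeapInv (heapSiftdown a 0 pos x) :=
  siftdownGo_spec x pos pos a (le_refl _) hpos D1 U1b U2

theorem siftupGo_spec (x : Int × Int) :
    ∀ (fuel pos : Nat) (a : List (Int × Int)), a.length ≤ fuel + pos → pos < a.length →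
    (∀ j, j < a.length → 0 < j → j ≠ pos → (j - 1) / 2 ≠ pos →
      toLex (a.getD ((j - 1) / 2) (0, 0)) ≤ toLex (a.getD j (0, 0))) →
    (0 < pos → ∀ j, j < a.length → 0 < j → (j - 1) / 2 = pos →
      toLex (a.getD ((pos - 1) / 2) (0, 0)) ≤ toLex (a.getD j (0, 0))) →
    (siftupGo fuel a 0 pos x).Perm (a.set pos x) ∧ HeapInv (siftupGo fuel a 0 pos x) := by
  intro fuel
  induction fuel with
  | zero =>
    intro pos a hf hpos _D1 _D2
    exact absurd hpos (by omega)
  | succ fuel ih =>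
    intro pos a hf hpos D1 D2
    simp only [siftupGo]
    by_cases hc : 2 * pos + 1 < a.length
    · rw [if_pos hc]
      have step : ∀ c : Nat, pos < c → c < a.length → (c - 1) / 2 = pos →
          (∀ s, s < a.length → 0 < s → (s - 1) / 2 = pos →
            toLex (a.getD c (0, 0)) ≤ toLex (a.getD s (0, 0))) →
          (siftupGo fuel (a.set pos (a.getD c (0, 0))) 0 c x).Perm (a.set pos x) ∧
            HeapInv (siftupGo fuel (a.set pos (a.getD c (0, 0))) 0 c x) := by
        intro c hcpos hclen hcpar hmin
        set w := a.getD c (0, 0) with hw_def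
        have hlen' : (a.set pos w).length = a.length := by simp
        have D1' : ∀ j, j < (a.set pos w).length → 0 < j → j ≠ c → (j - 1) / 2 ≠ c →
            toLex ((a.set pos w).getD ((j - 1) / 2) (0, 0)) ≤
              toLex ((a.set pos w).getD j (0, 0)) := by
          intro j hj h0j hjc hparc
          rw [hlen'] at hj
          by_cases hjpos : j = pos
          · subst hjpos
            rw [getD_set_self _ _ _ _ hpos, getD_set_ne _ _ _ (by omega) _ _]
            exact D2 h0j c hclen (by omega) hcpar
          · rw [getD_set_ne _ _ _ (Ne.symm hjpos) _ _]
            by_cases hpar : (j - 1) / 2 = pos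
            · rw [hpar, getD_set_self _ _ _ _ hpos]
              exact hmin j hj h0j hpar
            · rw [getD_set_ne _ _ _ (fun h => hpar h.symm) _ _]
              exact D1 j hj h0j hjpos hpar
        have D2' : 0 < c → ∀ j, j < (a.set pos w).length → 0 < j → (j - 1) / 2 = c →
            toLex ((a.set pos w).getD ((c - 1) / 2) (0, 0)) ≤
              toLex ((a.set pos w).getD j (0, 0)) := by
          intro _ j hj h0j hpar
          rw [hlen'] at hj
          have hjc : c < j := by omega
          rw [hcpar, getD_set_self _ _ _ _ hpos,
            getD_set_ne _ _ _ (by omega) _ _, hw_def]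
          have hD := D1 j hj h0j (by omega) (by omega)
          rw [hpar] at hD
          exact hD
        obtain ⟨hperm, hinv⟩ := ih c (a.set pos w)
          (by rw [hlen']; omega) (by rw [hlen']; exact hclen) D1' D2'
        refine ⟨hperm.trans ?_, hinv⟩
        exact perm_set_set a pos c x hpos hclen (by omega)
      by_cases hcond : (decide (2 * pos + 1 + 1 < a.length) &&
          !(pyLtPair (a.getD (2 * pos + 1) (0, 0)) (a.getD (2 * pos + 1 + 1) (0, 0)))) = true
      · rw [if_pos hcond]
        simp only [Bool.and_eq_true, decide_eq_true_eq, Bool.not_eq_true'] at hcond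
        obtain ⟨hc1, hc2⟩ := hcond
        refine step (2 * pos + 1 + 1) (by omega) (by omega) (by omega) ?_
        intro s hs h0s hspar
        have hle : toLex (a.getD (2 * pos + 1 + 1) (0, 0)) ≤
            toLex (a.getD (2 * pos + 1) (0, 0)) :=
          (pyLtPair_eq_false_iff _ _).mp hc2
        have : s = 2 * pos + 1 ∨ s = 2 * pos + 1 + 1 := by omega
        rcases this with h | h <;> subst h
        · exact hle
        · exact le_refl _
      · rw [if_neg hcond]
        simp only [Bool.and_eq_true, decide_eq_true_eq, Bool.not_eq_true', not_and_or] at hcond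
        refine step (2 * pos + 1) (by omega) (by omega) (by omega) ?_
        intro s hs h0s hspar
        have : s = 2 * pos + 1 ∨ s = 2 * pos + 1 + 1 := by omega
        rcases this with h | h <;> subst h
        · exact le_refl _
        · rcases hcond with h' | h'
          · omega
          · rw [Bool.not_eq_false] at h'
            exact le_of_lt ((pyLtPair_iff _ _).mp h')
    · rw [if_neg hc]
      have hlen' : (a.set pos x).length = a.length := by simp
      obtain ⟨hperm, hinv⟩ := siftdown_spec x pos (a.set pos x) (by omega)
        (by
          intro j hj h0j hjpos hpar
          rw [hlen'] at hj
          rw [getD_set_ne _ _ _ (Ne.symm hjpos) _ _,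
            getD_set_ne _ _ _ (fun h => hpar h.symm) _ _]
          exact D1 j hj h0j hjpos hpar)
        (by intro j hj _ hpar; rw [hlen'] at hj; omega)
        (by intro _ j hj _ hpar; rw [hlen'] at hj; omega)
      rw [List.set_set] at hperm
      exact ⟨hperm, hinv⟩

theorem siftup_spec (x : Int × Int) (n pos : Nat) (a : List (Int × Int))
    (_hn : a.length - pos = n) (hpos : pos < a.length)
    (D1 : ∀ j, j < a.length → 0 < j → j ≠ pos → (j - 1) / 2 ≠ pos →
      toLex (a.getD ((j - 1) / 2) (0, 0)) ≤ toLex (a.getD j (0, 0)))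
    (D2 : 0 < pos → ∀ j, j < a.length → 0 < j → (j - 1) / 2 = pos →
      toLex (a.getD ((pos - 1) / 2) (0, 0)) ≤ toLex (a.getD j (0, 0))) :
    (heapSiftup a 0 pos x).Perm (a.set pos x) ∧ HeapInv (heapSiftup a 0 pos x) :=
  siftupGo_spec x a.length pos a (by omega) hpos D1 D2

theorem getD_dropLast {α : Type} (l : List α) (i : Nat) (h : i < l.dropLast.length) (d : α) :
    l.dropLast.getD i d = l.getD i d := by
  rw [List.getD_eq_getElem?_getD, List.getD_eq_getElem?_getD, List.getElem?_eq_getElem h,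
    List.getElem_dropLast, List.getElem?_eq_getElem (by simp at h; omega)]

theorem dropLast_append_getLastD (h : List (Int × Int)) (hne : h ≠ []) :
    h.dropLast ++ [h.getLastD (0, 0)] = h := by
  have : h.getLastD (0, 0) = h.getLast hne := by
    rw [List.getLastD_eq_getLast?, List.getLast?_eq_some_getLast hne]; rfl
  rw [this, List.dropLast_append_getLast hne]

theorem heapPush_spec (h : List (Int × Int)) (x : Int × Int) (hinv : HeapInv h) :
    (heapPush h x).Perm (x :: h) ∧ HeapInv (heapPush h x) := by
  unfold heapPush
  obtain ⟨hperm, hinv'⟩ := siftdown_spec x h.length (h ++ [x]) (by simp)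
    (by
      intro j hj h0j hjpos _hpar
      simp only [List.length_append, List.length_singleton] at hj
      have hjlt : j < h.length := by omega
      rw [List.getD_append _ _ _ _ hjlt, List.getD_append _ _ _ _ (by omega)]
      exact hinv j hjlt h0j)
    (by intro j hj h0j hpar; simp at hj; omega)
    (by intro h0 j hj h0j hpar; simp at hj; omega)
  refine ⟨hperm.trans ?_, hinv'⟩
  have : (h ++ [x]).set h.length x = h ++ [x] := by
    rw [List.set_append_right _ _ (le_refl _)]
    simp
  rw [this]
  exact List.perm_append_singleton x h

theorem heapPop_spec (h : List (Int × Int)) (hinv : HeapInv h) (hne : h ≠ []) :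
    ((heapPop h).1 :: (heapPop h).2).Perm h ∧ HeapInv (heapPop h).2 ∧
      ∀ y ∈ h, toLex (heapPop h).1 ≤ toLex y := by
  unfold heapPop
  dsimp only
  have hsplit : h.dropLast ++ [h.getLastD (0, 0)] = h := dropLast_append_getLastD h hne
  by_cases hre : h.dropLast.isEmpty
  · rw [if_pos hre]
    rw [List.isEmpty_iff] at hre
    have hsplit' : [h.getLastD (0, 0)] = h := by
      rw [hre] at hsplit; simpa using hsplit
    dsimp only
    rw [hre]
    refine ⟨by rw [hsplit'], ?_, ?_⟩
    · intro j hj _; simp at hj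
    · intro y hy
      rw [← hsplit', List.mem_singleton] at hy
      rw [hy]
  · rw [if_neg hre]
    set last := h.getLastD (0, 0) with hlast_def
    set rest := h.dropLast with hrest_def
    have hrl : 0 < rest.length := by
      cases hr : rest; · rw [hr] at hre; simp at hre
      · simp
    have hrlen : rest.length = h.length - 1 := by simp [hrest_def]
    have hhl : 1 < h.length := by omega
    obtain ⟨hperm, hinv'⟩ := (by
      exact siftup_spec last ((rest.set 0 last).length - 0) 0 (rest.set 0 last) rfl
        (by simpa using hrl)
        (by
          intro j hj h0j hjpos hpar
          simp only [List.length_set] at hj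
          rw [getD_set_ne _ _ _ (Ne.symm hjpos) _ _,
            getD_set_ne _ _ _ (fun hh => hpar hh.symm) _ _,
            getD_dropLast _ _ (by simp only [List.length_dropLast]; omega) _,
            getD_dropLast _ _ (by simp only [List.length_dropLast]; omega) _]
          exact hinv j (by omega) h0j)
        (fun h0 => absurd h0 (by omega)) :
      (heapSiftup (rest.set 0 last) 0 0 last).Perm ((rest.set 0 last).set 0 last) ∧
        HeapInv (heapSiftup (rest.set 0 last) 0 0 last))
    rw [List.set_set] at hperm
    have hcons : (rest.getD 0 (0, 0) :: rest.set 0 last).Perm (rest ++ [last]) := by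
      cases hr : rest with
      | nil => rw [hr] at hrl; simp at hrl
      | cons a t =>
        simp only [List.getD_cons_zero, List.set_cons_zero, List.cons_append]
        exact List.Perm.cons a (List.perm_append_singleton last t).symm
    refine ⟨((hperm.cons _).trans hcons).trans (by rw [hsplit]), hinv', ?_⟩
    intro y hy
    have hroot : rest.getD 0 (0, 0) = h.getD 0 (0, 0) := getD_dropLast h 0 hrl _
    rw [hroot]
    obtain ⟨j, hj, hyj⟩ := List.mem_iff_getElem.mp hy
    rw [← hyj, ← getD_eq_getElem _ _ (0, 0) hj]
    exact root_min h hinv j hj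

theorem popLoopGo_spec : ∀ (fuel : Nat) (h : List (Int × Int)), h.length ≤ fuel →
    HeapInv h → ∀ acc, ∃ ps : List (Int × Int), ps.Perm h ∧
      ps.Pairwise (fun u v => toLex u ≤ toLex v) ∧
      popLoopGo fuel h acc = acc ++ ps.map (·.2) := by
  intro fuel
  induction fuel with
  | zero =>
    intro h hlen _hinv acc
    have hh : h = [] := List.eq_nil_of_length_eq_zero (by omega)
    subst hh
    exact ⟨[], List.Perm.refl _, List.Pairwise.nil, by simp [popLoopGo]⟩
  | succ fuel ih =>
    intro h hlen hinv acc
    by_cases hre : h.isEmpty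
    · refine ⟨[], ?_, List.Pairwise.nil, ?_⟩
      · rw [List.isEmpty_iff] at hre; rw [hre]
      · simp only [popLoopGo]; rw [if_pos hre]; simp
    · have hne : h ≠ [] := by
        intro hh; rw [hh] at hre; simp at hre
      obtain ⟨hpm, hinv', hmin⟩ := heapPop_spec h hinv hne
      have hlen' : (heapPop h).2.length = h.length - 1 := by
        have := hpm.length_eq
        simp only [List.length_cons] at this
        omega
      obtain ⟨ps', hps'p, hps'pw, hps'eq⟩ :=
        ih (heapPop h).2 (by omega) hinv' (acc ++ [(heapPop h).1.2])
      refine ⟨(heapPop h).1 :: ps', (hps'p.cons _).trans hpm, ?_, ?_⟩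
      · refine List.Pairwise.cons ?_ hps'pw
        intro y hy
        exact hmin y (hpm.mem_iff.mp (List.mem_cons_of_mem _ ((hps'p.mem_iff).mp hy)))
      · simp only [popLoopGo]
        rw [if_neg hre]
        rw [hps'eq, List.map_cons, List.append_assoc]
        rfl

theorem popLoop_spec : ∀ (n : Nat) (h : List (Int × Int)), h.length = n → HeapInv h →
    ∀ acc, ∃ ps : List (Int × Int), ps.Perm h ∧
      ps.Pairwise (fun u v => toLex u ≤ toLex v) ∧
      popLoop h acc = acc ++ ps.map (·.2) := by
  intro n h _hn hinv acc
  exact popLoopGo_spec h.length h (le_refl _) hinv acc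

theorem heapInv_nil : HeapInv [] := by
  intro j hj _; simp at hj

theorem pushFold_spec {β : Type} (F : β → Int × Int) :
    ∀ (l : List β) (h0 : List (Int × Int)), HeapInv h0 →
    (l.foldl (fun hp t => heapPush hp (F t)) h0).Perm (h0 ++ l.map F) ∧
      HeapInv (l.foldl (fun hp t => heapPush hp (F t)) h0) := by
  intro l
  induction l with
  | nil =>
    intro h0 hinv
    simp only [List.foldl_nil, List.map_nil, List.append_nil]
    exact ⟨List.Perm.refl _, hinv⟩
  | cons t ts ihl =>
    intro h0 hinv
    obtain ⟨hp1, hi1⟩ := heapPush_spec h0 (F t) hinv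
    obtain ⟨hp2, hi2⟩ := ihl (heapPush h0 (F t)) hi1
    refine ⟨?_, by simpa using hi2⟩
    simp only [List.foldl_cons, List.map_cons]
    refine hp2.trans ?_
    refine (hp1.append_right _).trans ?_
    rw [List.cons_append]
    exact List.perm_middle.symm

theorem insertBy_perm {α : Type} (before : α → α → Bool) (x : α) :
    ∀ ys : List α, (PySem.List.insertBy before x ys).Perm (x :: ys) := by
  intro ys
  induction ys with
  | nil => exact List.Perm.refl _
  | cons y ys ih =>
    show (if before x y then x :: y :: ys else y :: PySem.List.insertBy before x ys).Perm _
    split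
    · exact List.Perm.refl _
    · exact (ih.cons y).trans (List.Perm.swap x y ys)

theorem before_iff {α : Type} (k1 k2 : α → Int) (a b : α) :
    (decide (k1 a < k1 b) || !decide (k1 b < k1 a) && decide (k2 a < k2 b)) = true ↔
      toLex (k1 a, k2 a) < toLex (k1 b, k2 b) := by
  simp only [Bool.or_eq_true, decide_eq_true_eq, Bool.and_eq_true, Bool.not_eq_true',
    decide_eq_false_iff_not, Prod.Lex.toLex_lt_toLex]
  constructor <;> intro h <;> omega

theorem insertBy_pairwise {α : Type} (k1 k2 : α → Int) (x : α) :
    ∀ ys : List α,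
      ys.Pairwise (fun a b => toLex (k1 a, k2 a) ≤ toLex (k1 b, k2 b)) →
      (PySem.List.insertBy
        (fun a b => decide (k1 a < k1 b) || !decide (k1 b < k1 a) && decide (k2 a < k2 b))
        x ys).Pairwise (fun a b => toLex (k1 a, k2 a) ≤ toLex (k1 b, k2 b)) := by
  intro ys
  induction ys with
  | nil => intro _; exact List.pairwise_singleton _ _
  | cons y ys ih =>
    intro hpw
    obtain ⟨hy, hys⟩ := List.pairwise_cons.mp hpw
    show (if (decide (k1 x < k1 y) || !decide (k1 y < k1 x) && decide (k2 x < k2 y)) then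
        x :: y :: ys else y :: PySem.List.insertBy _ x ys).Pairwise _
    split
    · next hb =>
      refine List.pairwise_cons.mpr ⟨?_, hpw⟩
      intro z hz
      have hxy : toLex (k1 x, k2 x) ≤ toLex (k1 y, k2 y) :=
        le_of_lt ((before_iff k1 k2 x y).mp hb)
      rcases List.mem_cons.mp hz with h | h
      · rw [h]; exact hxy
      · exact le_trans hxy (hy z h)
    · next hb =>
      refine List.pairwise_cons.mpr ⟨?_, ih hys⟩
      intro z hz
      rcases List.mem_cons.mp ((insertBy_perm _ x ys).mem_iff.mp hz) with h | h
      · rw [h]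
        have : ¬ toLex (k1 x, k2 x) < toLex (k1 y, k2 y) := fun hc =>
          hb ((before_iff k1 k2 x y).mpr hc)
        exact le_of_not_gt this
      · exact hy z h

theorem foldl_insertBy_spec {α : Type} (k1 k2 : α → Int) :
    ∀ (xs acc : List α),
      acc.Pairwise (fun a b => toLex (k1 a, k2 a) ≤ toLex (k1 b, k2 b)) →
      (xs.foldl (fun acc x => PySem.List.insertBy
        (fun a b => decide (k1 a < k1 b) || !decide (k1 b < k1 a) && decide (k2 a < k2 b))
        x acc) acc).Perm (acc ++ xs) ∧
      (xs.foldl (fun acc x => PySem.List.insertBy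
        (fun a b => decide (k1 a < k1 b) || !decide (k1 b < k1 a) && decide (k2 a < k2 b))
        x acc) acc).Pairwise (fun a b => toLex (k1 a, k2 a) ≤ toLex (k1 b, k2 b)) := by
  intro xs
  induction xs with
  | nil =>
    intro acc hacc
    simp only [List.foldl_nil, List.append_nil]
    exact ⟨List.Perm.refl _, hacc⟩
  | cons x xs ih =>
    intro acc hacc
    obtain ⟨hp, hpw⟩ := ih _ (insertBy_pairwise k1 k2 x acc hacc)
    refine ⟨?_, hpw⟩
    simp only [List.foldl_cons]
    refine hp.trans ?_
    refine ((insertBy_perm _ x acc).append_right _).trans ?_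
    rw [List.cons_append]
    exact List.perm_middle.symm

theorem dict_fold_mem (w : String) :
    ∀ (l : List String) (d : PySem.Dict String Int),
      ((l.foldl (fun d i => d.insert i 1) d).get? w).isSome = true ↔
        (d.get? w).isSome = true ∨ w ∈ l := by
  intro l
  induction l with
  | nil => intro d; simp
  | cons a t ih =>
    intro d
    rw [List.foldl_cons, ih, PySem.Dict.get?_insert]
    by_cases h : w = a <;> simp [h]

theorem cnt_eq (A s : String) :
    ((PySem.Str.split? s "_").getD []).foldl
      (fun c word =>
        if ((((PySem.Str.split? A "_").getD []).foldl
            (fun d i => d.insert i 1)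
            (PySem.Dict.empty : PySem.Dict String Int)).get? word).isSome then c + 1 else c)
      (0 : Int) =
    (((PySem.Str.split? s "_").getD []).map
      (fun w => if PySem.Set.contains
          (PySem.Set.ofList ((PySem.Str.split? A "_").getD [])) w then (1 : Int) else 0)).sum := by
  rw [PySem.List.foldl_count_if, PySem.List.sum_map_ite_one_zero, zero_add]
  congr 1
  apply List.countP_congr
  intro w _
  have h1 := dict_fold_mem w ((PySem.Str.split? A "_").getD []) PySem.Dict.empty
  simp only [PySem.Dict.get?_empty, Option.isSome_none, Bool.false_eq_true, false_or] at h1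
  simpa [PySem.Set.contains_iff, PySem.Set.mem_ofList] using h1

theorem solve_eq_alt (A : String) (B : List String) : solve A B = solve_alt A B := by
  unfold solve solve_alt
  dsimp only
  set gw : PySem.Dict String Int :=
    ((PySem.Str.split? A "_").getD []).foldl (fun d i => d.insert i 1) PySem.Dict.empty
    with hgw
  set cA : String → Int := fun s =>
    ((PySem.Str.split? s "_").getD []).foldl
      (fun c word => if (gw.get? word).isSome then c + 1 else c) 0 with hcA
  set cB : String → Int := fun s =>
    (((PySem.Str.split? s "_").getD []).map
      (fun w => if (PySem.Set.ofList ((PySem.Str.split? A "_").getD [])).contains w then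
        (1 : Int) else 0)).sum with hcB
  set R : List Int := PySem.List.pyRange 0 (PySem.List.len B) 1 with hR
  set F : Int → Int × Int := fun i => (-(cA (PySem.List.pyGetD B i "")), i) with hF
  set k1 : Int → Int := fun i => -(PySem.List.pyGetD (B.map cB) i 0) with hk1
  set pf : Int → Int × Int := fun i => (k1 i, i) with hpf
  -- A side: the push loop builds a heap that is a permutation of R.map F
  obtain ⟨hheapperm, hheapinv⟩ := pushFold_spec F R [] heapInv_nil
  obtain ⟨ps, hpsperm, hpspw, hpseq⟩ :=
    popLoop_spec (R.foldl (fun hp t => heapPush hp (F t)) []).length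
      (R.foldl (fun hp t => heapPush hp (F t)) []) rfl hheapinv []
  rw [hpseq, List.nil_append]
  -- B side: sorted2 is the insertBy fold
  obtain ⟨hsp, hspw⟩ := foldl_insertBy_spec k1 (fun i => i) R [] List.Pairwise.nil
  rw [List.nil_append] at hsp
  -- the two key functions agree on R
  have hFpf : ∀ i ∈ R, F i = pf i := by
    intro i hi
    rw [hR, PySem.List.mem_pyRange_one] at hi
    have h0 : 0 ≤ i := hi.1
    have h1 : i < (B.length : Int) := by simpa using hi.2
    rw [hF, hpf, hk1]
    dsimp only
    rw [PySem.List.pyGetD_eq_getElem B "" h0 h1,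
      PySem.List.pyGetD_eq_getElem (B.map cB) 0 h0 (by simpa using h1),
      List.getElem_map, hcA, hcB]
    dsimp only
    rw [hgw]
    rw [cnt_eq A B[i.toNat]]
  have hmapF : R.map F = R.map pf := List.map_congr_left hFpf
  -- the popped sequence equals the sorted indices mapped to their key pairs
  set srt : List Int := R.foldl (fun acc x => PySem.List.insertBy
    (fun a b => decide (k1 a < k1 b) || !decide (k1 b < k1 a) && decide ((fun i => i) a < (fun i => i) b))
    x acc) [] with hsrt
  have hps : ps = srt.map pf := by
    apply PySem.List.eq_of_perm_of_pairwise_le_of_injective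
      (key := fun u : Int × Int => toLex u) (fun u v h => by simpa using h)
    · exact (hpsperm.trans (hheapperm.trans (by rw [List.nil_append, hmapF]))).trans
        ((hsp.map pf).symm)
    · exact hpspw
    · exact List.pairwise_map.mpr hspw
  rw [hps, List.map_map]
  have hid : ((fun u : Int × Int => u.2) ∘ pf) = fun i => i := rfl
  rw [hid, List.map_id']
  rfl

-- ===== VERDICT (by name: the statement is the Claim_ definition above) =====
theorem solve_spec : Claim_equal_solve := by
  intro A B _
  unfold Spec_solve
  exact solve_eq_alt A B
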